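-- pv_equiv track=rewrite | github.com/az1k-dev/ShkolkovoHomework | Homework/1/24.py | sources_and_stocks_from_adjacency_matrix_directed
-- ===== SOURCE A (Python) =====
-- def sources_and_stocks_from_adjacency_matrix_directed(matrix, start):
--     n = len(matrix)
--
--     sources = []
--     stocks = []
--
--     for i in range(n):
--         if all(map(lambda s: s == 0, matrix[i])):
--             stocks.append(i + start)
--         if all(map(lambda s: s == 0, [matrix[k][i] for k in range(n)])):
--             sources.append(i + start)
--
--     return sources, stocks
-- ===== SOURCE B (Python) =====
-- def sources_and_stocks_from_adjacency_matrix_directed(matrix, start):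
--     n = len(matrix)
--     has_out = set()
--     has_in = set()
--     for i, row in enumerate(matrix):
--         for j, v in enumerate(row):
--             if v != 0:
--                 has_out.add(i)
--                 has_in.add(j)
--     sources = [i + start for i in range(n) if i not in has_in]
--     stocks = [i + start for i in range(n) if i not in has_out]
--     return sources, stocks
-- ===== Notes on version B (the rewrite author's own statement) =====
-- stated objective: alternative
-- what changed: Replaces A's per-index all-zero scans (rebuilding each column with a comprehension for every i) by a single accumulation pass over the enumerated entries that records rows/columns carrying a nonzero entry in two sets, followed by one emit pass over range(n); Pre_ excludes matrices with a row shorter than len(matrix), on which A raises IndexError.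
import Mathlib
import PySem

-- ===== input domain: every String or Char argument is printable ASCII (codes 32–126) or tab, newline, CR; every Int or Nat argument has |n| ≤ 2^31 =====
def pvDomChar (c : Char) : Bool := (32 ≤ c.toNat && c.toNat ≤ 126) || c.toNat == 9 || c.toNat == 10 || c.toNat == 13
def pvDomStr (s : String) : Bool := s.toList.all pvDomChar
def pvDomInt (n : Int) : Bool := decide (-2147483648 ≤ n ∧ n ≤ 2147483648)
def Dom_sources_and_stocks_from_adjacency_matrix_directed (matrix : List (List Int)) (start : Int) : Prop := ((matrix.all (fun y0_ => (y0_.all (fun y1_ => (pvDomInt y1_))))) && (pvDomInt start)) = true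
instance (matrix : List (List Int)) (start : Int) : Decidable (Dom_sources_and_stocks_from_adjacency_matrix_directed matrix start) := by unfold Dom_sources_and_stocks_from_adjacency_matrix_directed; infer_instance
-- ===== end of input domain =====

-- B replaces A's per-index column-rebuilding scans by one accumulation pass over the
-- entries (recording rows/columns that carry a nonzero entry in two sets) plus an emit
-- pass (same asymptotic cost, different traversal); equivalence is claimed on matrices
-- whose rows all have length ≥ len(matrix) (elsewhere A raises IndexError).

-- ===== PORT A =====
def sources_and_stocks_from_adjacency_matrix_directed (matrix : List (List Int)) (start : Int) : List Int × List Int :=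
  let n := matrix.length
  (List.range n).foldl (fun (acc : List Int × List Int) (i : Nat) =>
    let stocks := if (PySem.List.pyGetD matrix ((i : Int)) []).all (fun s => s == 0)
      then acc.2 ++ [(i : Int) + start] else acc.2
    let col := (List.range n).map (fun (k : Nat) =>
      PySem.List.pyGetD (PySem.List.pyGetD matrix ((k : Int)) []) ((i : Int)) 0)
    let sources := if col.all (fun s => s == 0)
      then acc.1 ++ [(i : Int) + start] else acc.1
    (sources, stocks)) ([], [])

-- ===== PORT B =====
def sources_and_stocks_from_adjacency_matrix_directed_alt (matrix : List (List Int)) (start : Int) : List Int × List Int :=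
  let n := matrix.length
  let fl : PySem.Set Int × PySem.Set Int :=
    (PySem.List.enumerate matrix 0).foldl (fun fl p =>
      (PySem.List.enumerate p.2 0).foldl (fun (fl : PySem.Set Int × PySem.Set Int) q =>
        if q.2 ≠ 0 then (PySem.Set.add fl.1 p.1, PySem.Set.add fl.2 q.1) else fl) fl)
      (PySem.Set.empty, PySem.Set.empty)
  let sources := (List.range n).foldl (fun (acc : List Int) (i : Nat) =>
    if PySem.Set.contains fl.2 (i : Int) then acc else acc ++ [(i : Int) + start]) []
  let stocks := (List.range n).foldl (fun (acc : List Int) (i : Nat) =>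
    if PySem.Set.contains fl.1 (i : Int) then acc else acc ++ [(i : Int) + start]) []
  (sources, stocks)

-- ===== PRECONDITION & SPEC =====
-- Pre_ excludes exactly the inputs where A raises IndexError: some row shorter than len(matrix).
def Pre_sources_and_stocks_from_adjacency_matrix_directed (matrix : List (List Int)) (_start : Int) : Prop :=
  ∀ row ∈ matrix, matrix.length ≤ row.length
instance (matrix : List (List Int)) (start : Int) : Decidable (Pre_sources_and_stocks_from_adjacency_matrix_directed matrix start) := by unfold Pre_sources_and_stocks_from_adjacency_matrix_directed; infer_instance
def pvWitness_sources_and_stocks_from_adjacency_matrix_directed : List (List Int) × Int := ([[0, 1], [0, 0]], 5)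

def Spec_sources_and_stocks_from_adjacency_matrix_directed (matrix : List (List Int)) (start : Int) (out : List Int × List Int) : Prop := out = sources_and_stocks_from_adjacency_matrix_directed_alt matrix start
instance (matrix : List (List Int)) (start : Int) (out : List Int × List Int) : Decidable (Spec_sources_and_stocks_from_adjacency_matrix_directed matrix start out) := by unfold Spec_sources_and_stocks_from_adjacency_matrix_directed; infer_instance

-- ===== CLAIM (what is proved, stated in full; the proofs are below) =====
def Claim_equal_sources_and_stocks_from_adjacency_matrix_directed : Prop := ∀ (matrix : List (List Int)) (start : Int), Dom_sources_and_stocks_from_adjacency_matrix_directed matrix start → Pre_sources_and_stocks_from_adjacency_matrix_directed matrix start → Spec_sources_and_stocks_from_adjacency_matrix_directed matrix start (sources_and_stocks_from_adjacency_matrix_directed matrix start)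
-- ===== LEMMAS AND PROOFS =====

-- the inner fold of B over one enumerated row
def pvInner (i : Int) (row : List Int) (s : Int)
    (st : PySem.Set Int × PySem.Set Int) : PySem.Set Int × PySem.Set Int :=
  (PySem.List.enumerate row s).foldl (fun (fl : PySem.Set Int × PySem.Set Int) q =>
    if q.2 ≠ 0 then (PySem.Set.add fl.1 i, PySem.Set.add fl.2 q.1) else fl) st

-- the outer fold of B
def pvOuter (matrix : List (List Int)) (s : Int)
    (st : PySem.Set Int × PySem.Set Int) : PySem.Set Int × PySem.Set Int :=
  (PySem.List.enumerate matrix s).foldl (fun fl p => pvInner p.1 p.2 0 fl) st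

theorem pvInner_cons (i : Int) (v : Int) (vs : List Int) (s : Int)
    (st : PySem.Set Int × PySem.Set Int) :
    pvInner i (v :: vs) s st = pvInner i vs (s + 1)
      (if v ≠ 0 then (PySem.Set.add st.1 i, PySem.Set.add st.2 s) else st) := by
  simp only [pvInner, PySem.List.enumerate_cons, List.foldl_cons]

theorem pvOuter_cons (row : List Int) (rest : List (List Int)) (s : Int)
    (st : PySem.Set Int × PySem.Set Int) :
    pvOuter (row :: rest) s st = pvOuter rest (s + 1) (pvInner s row 0 st) := by
  simp only [pvOuter, PySem.List.enumerate_cons, List.foldl_cons]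

theorem mem_pvInner_fst (i : Int) (row : List Int) (s : Int)
    (st : PySem.Set Int × PySem.Set Int) (x : Int) :
    x ∈ (pvInner i row s st).1 ↔ x ∈ st.1 ∨ (x = i ∧ ∃ v ∈ row, v ≠ 0) := by
  induction row generalizing s st with
  | nil => simp [pvInner, PySem.List.enumerate_nil]
  | cons v vs ih =>
    rw [pvInner_cons, ih]
    have hstep : x ∈ (if v ≠ 0 then (PySem.Set.add st.1 i, PySem.Set.add st.2 s) else st).1
        ↔ x ∈ st.1 ∨ (v ≠ 0 ∧ x = i) := by
      by_cases hv : v = 0 <;> simp [hv, PySem.Set.mem_add]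
    rw [hstep]
    simp only [List.mem_cons]
    constructor
    · rintro ((h | ⟨hv, rfl⟩) | ⟨rfl, v', hv', hne⟩)
      · exact Or.inl h
      · exact Or.inr ⟨rfl, v, Or.inl rfl, hv⟩
      · exact Or.inr ⟨rfl, v', Or.inr hv', hne⟩
    · rintro (h | ⟨rfl, v', (rfl | hv'), hne⟩)
      · exact Or.inl (Or.inl h)
      · exact Or.inl (Or.inr ⟨hne, rfl⟩)
      · exact Or.inr ⟨rfl, v', hv', hne⟩

theorem mem_pvInner_snd (i : Int) (row : List Int) (s : Int)
    (st : PySem.Set Int × PySem.Set Int) (y : Int) :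
    y ∈ (pvInner i row s st).2 ↔ y ∈ st.2 ∨
      ∃ (j : Nat) (_ : j < row.length), row[j] ≠ 0 ∧ y = s + (j : Int) := by
  induction row generalizing s st with
  | nil => simp [pvInner, PySem.List.enumerate_nil]
  | cons v vs ih =>
    rw [pvInner_cons, ih]
    have hstep : y ∈ (if v ≠ 0 then (PySem.Set.add st.1 i, PySem.Set.add st.2 s) else st).2
        ↔ y ∈ st.2 ∨ (v ≠ 0 ∧ y = s) := by
      by_cases hv : v = 0 <;> simp [hv, PySem.Set.mem_add]
    rw [hstep]
    constructor
    · rintro ((h | ⟨hv, rfl⟩) | ⟨j, hj, h2, h3⟩)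
      · exact Or.inl h
      · exact Or.inr ⟨0, by simp, by simpa using hv, by simp⟩
      · refine Or.inr ⟨j + 1, by simp only [List.length_cons]; omega, by simpa using h2, ?_⟩
        omega
    · rintro (h | ⟨j, hj, h2, h3⟩)
      · exact Or.inl (Or.inl h)
      · cases j with
        | zero => exact Or.inl (Or.inr ⟨by simpa using h2, by simpa using h3⟩)
        | succ j =>
          refine Or.inr ⟨j, by simp only [List.length_cons] at hj; omega, by simpa using h2, ?_⟩
          omega

theorem mem_pvOuter_fst (matrix : List (List Int)) (s : Int)
    (st : PySem.Set Int × PySem.Set Int) (x : Int) :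
    x ∈ (pvOuter matrix s st).1 ↔ x ∈ st.1 ∨
      ∃ (k : Nat) (_ : k < matrix.length), x = s + (k : Int) ∧ ∃ v ∈ matrix[k], v ≠ 0 := by
  induction matrix generalizing s st with
  | nil => simp [pvOuter, PySem.List.enumerate_nil]
  | cons row rest ih =>
    rw [pvOuter_cons, ih, mem_pvInner_fst]
    constructor
    · rintro ((h | ⟨rfl, hv⟩) | ⟨k, hk, h1, h2⟩)
      · exact Or.inl h
      · exact Or.inr ⟨0, by simp, by simp, by simpa using hv⟩
      · refine Or.inr ⟨k + 1, by simp only [List.length_cons]; omega, ?_, by simpa using h2⟩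
        omega
    · rintro (h | ⟨k, hk, h1, h2⟩)
      · exact Or.inl (Or.inl h)
      · cases k with
        | zero => exact Or.inl (Or.inr ⟨by simpa using h1, by simpa using h2⟩)
        | succ k =>
          refine Or.inr ⟨k, by simp only [List.length_cons] at hk; omega, ?_, by simpa using h2⟩
          omega

theorem mem_pvOuter_snd (matrix : List (List Int)) (s : Int)
    (st : PySem.Set Int × PySem.Set Int) (y : Int) :
    y ∈ (pvOuter matrix s st).2 ↔ y ∈ st.2 ∨
      ∃ (k : Nat) (_ : k < matrix.length) (j : Nat) (_ : j < matrix[k].length),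
        matrix[k][j] ≠ 0 ∧ y = (j : Int) := by
  induction matrix generalizing s st with
  | nil => simp [pvOuter, PySem.List.enumerate_nil]
  | cons row rest ih =>
    rw [pvOuter_cons, ih, mem_pvInner_snd]
    constructor
    · rintro ((h | ⟨j, hj, h2, h3⟩) | ⟨k, hk, j, hj, h2, h3⟩)
      · exact Or.inl h
      · exact Or.inr ⟨0, by simp, j, by simpa using hj, by simpa using h2, by simpa using h3⟩
      · exact Or.inr ⟨k + 1, by simp only [List.length_cons]; omega, j, by simpa using hj, by simpa using h2, h3⟩
    · rintro (h | ⟨k, hk, j, hj, h2, h3⟩)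
      · exact Or.inl (Or.inl h)
      · cases k with
        | zero => exact Or.inl (Or.inr ⟨j, by simpa using hj, by simpa using h2, by simpa using h3⟩)
        | succ k => exact Or.inr ⟨k, by simp only [List.length_cons] at hk; omega, j, by simpa using hj, by simpa using h2, h3⟩

theorem pvBoolNot (a b : Bool) (h : a = true ↔ ¬ (b = true)) : b = !a := by
  cases a <;> cases b <;> simp_all

-- A's combined fold splits into two independent folds
theorem pvSplit (L : List Nat) (f g : List Int → Nat → List Int) (a b : List Int) :
    L.foldl (fun (acc : List Int × List Int) i => (f acc.1 i, g acc.2 i)) (a, b)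
      = (L.foldl f a, L.foldl g b) := by
  induction L generalizing a b with
  | nil => rfl
  | cons x xs ih => simp [List.foldl, ih]

-- ===== VERDICT (by name: the statement is the Claim_ definition above) =====
theorem sources_and_stocks_from_adjacency_matrix_directed_spec : Claim_equal_sources_and_stocks_from_adjacency_matrix_directed := by
  intro matrix start _ hPre
  unfold Spec_sources_and_stocks_from_adjacency_matrix_directed
  have hB : sources_and_stocks_from_adjacency_matrix_directed_alt matrix start =
      ((List.range matrix.length).foldl (fun (acc : List Int) (i : Nat) =>
        if PySem.Set.contains (pvOuter matrix 0 ([], [])).2 (i : Int) then acc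
        else acc ++ [(i : Int) + start]) [],
       (List.range matrix.length).foldl (fun (acc : List Int) (i : Nat) =>
        if PySem.Set.contains (pvOuter matrix 0 ([], [])).1 (i : Int) then acc
        else acc ++ [(i : Int) + start]) []) := by
    unfold sources_and_stocks_from_adjacency_matrix_directed_alt pvOuter pvInner
    rfl
  have hA : sources_and_stocks_from_adjacency_matrix_directed matrix start =
      ((List.range matrix.length).foldl (fun (acc : List Int) (i : Nat) =>
        if ((List.range matrix.length).map (fun (k : Nat) =>
            PySem.List.pyGetD (PySem.List.pyGetD matrix ((k : Int)) []) ((i : Int)) 0)).all (fun s => s == 0)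
        then acc ++ [(i : Int) + start] else acc) [],
       (List.range matrix.length).foldl (fun (acc : List Int) (i : Nat) =>
        if (PySem.List.pyGetD matrix ((i : Int)) []).all (fun s => s == 0)
        then acc ++ [(i : Int) + start] else acc) []) := by
    unfold sources_and_stocks_from_adjacency_matrix_directed
    exact pvSplit (List.range matrix.length)
      (fun (a : List Int) (i : Nat) => if ((List.range matrix.length).map (fun (k : Nat) =>
          PySem.List.pyGetD (PySem.List.pyGetD matrix ((k : Int)) []) ((i : Int)) 0)).all (fun s => s == 0)
        then a ++ [(i : Int) + start] else a)
      (fun a i => if (PySem.List.pyGetD matrix ((i : Int)) []).all (fun s => s == 0)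
        then a ++ [(i : Int) + start] else a)
      [] []
  rw [hA, hB]
  have hrowlen : ∀ (k : Nat) (h : k < matrix.length), matrix.length ≤ matrix[k].length := by
    intro k h
    exact hPre matrix[k] (List.getElem_mem h)
  refine Prod.ext ?_ ?_
  · -- sources
    show List.foldl _ [] (List.range matrix.length) = List.foldl _ [] (List.range matrix.length)
    apply PySem.List.foldl_congr_mem
    intro acc i hi
    have hi' : i < matrix.length := List.mem_range.mp hi
    have hcol : (((List.range matrix.length).map (fun (k : Nat) =>
        PySem.List.pyGetD (PySem.List.pyGetD matrix ((k : Int)) []) ((i : Int)) 0)).all (fun s => s == 0)) = true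
        ↔ ¬ ((i : Int) ∈ (pvOuter matrix 0 ([], [])).2) := by
      rw [mem_pvOuter_snd]
      simp only [List.all_eq_true, List.mem_map, List.mem_range, List.not_mem_nil, false_or]
      constructor
      · rintro hall ⟨k, hk, j, hj, h2, h3⟩
        have hji : j = i := by omega
        subst hji
        apply h2
        have := hall _ ⟨k, hk, rfl⟩
        rw [PySem.List.pyGetD_natCast, PySem.List.pyGetD_natCast, List.getD_eq_getElem _ _ hk,
            List.getD_eq_getElem _ _ (by have := hrowlen k hk; omega)] at this
        simpa using this
      · intro hn x hx
        obtain ⟨k, hk, rfl⟩ := hx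
        rw [PySem.List.pyGetD_natCast, PySem.List.pyGetD_natCast, List.getD_eq_getElem _ _ hk,
            List.getD_eq_getElem _ _ (by have := hrowlen k hk; omega)]
        simp only [beq_iff_eq]
        by_contra hne
        exact hn ⟨k, hk, i, by have := hrowlen k hk; omega, hne, rfl⟩
    have hc : PySem.Set.contains (pvOuter matrix 0 ([], [])).2 (i : Int)
        = !(((List.range matrix.length).map (fun (k : Nat) =>
            PySem.List.pyGetD (PySem.List.pyGetD matrix ((k : Int)) []) ((i : Int)) 0)).all (fun s => s == 0)) :=
      pvBoolNot _ _ (by rw [PySem.Set.contains_iff]; exact hcol)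
    rw [hc]
    cases (((List.range matrix.length).map (fun (k : Nat) =>
        PySem.List.pyGetD (PySem.List.pyGetD matrix ((k : Int)) []) ((i : Int)) 0)).all (fun s => s == 0)) <;> simp
  · -- stocks
    show List.foldl _ [] (List.range matrix.length) = List.foldl _ [] (List.range matrix.length)
    apply PySem.List.foldl_congr_mem
    intro acc i hi
    have hi' : i < matrix.length := List.mem_range.mp hi
    have hrow : ((PySem.List.pyGetD matrix ((i : Int)) []).all (fun s => s == 0)) = true
        ↔ ¬ ((i : Int) ∈ (pvOuter matrix 0 ([], [])).1) := by
      rw [mem_pvOuter_fst]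
      rw [PySem.List.pyGetD_natCast, List.getD_eq_getElem _ _ hi']
      simp only [List.all_eq_true, beq_iff_eq, List.not_mem_nil, false_or]
      constructor
      · rintro hall ⟨k, hk, h1, ⟨v, hv, hvne⟩⟩
        have hki : k = i := by omega
        subst hki
        exact hvne (hall v hv)
      · intro hn v hv
        by_contra hne
        exact hn ⟨i, hi', by simp, v, hv, hne⟩
    have hc : PySem.Set.contains (pvOuter matrix 0 ([], [])).1 (i : Int)
        = !((PySem.List.pyGetD matrix ((i : Int)) []).all (fun s => s == 0)) :=
      pvBoolNot _ _ (by rw [PySem.Set.contains_iff]; exact hrow)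
    rw [hc]
    cases ((PySem.List.pyGetD matrix ((i : Int)) []).all (fun s => s == 0)) <;> simp
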